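-- pv_equiv track=rewrite | github.com/LucasZampronio/PROG-COMPETITIVA | oficina/exercicio02_oficina.py | buscamenor
-- ===== SOURCE A (Python) =====
-- def buscamenor(lista):
--     menor = lista[0]
--     menor_indice = 0
--     for i in range(1, len(lista)):
--         if lista[i][1] > menor[1]:
--             menor = lista[i]
--             menor_indice = i
--
--         elif lista[i][1] == menor[1] and lista[i][0] < menor[0]:
--             menor = lista[i]
--             menor_indice = i
--     return menor_indice
-- ===== SOURCE B (Python) =====
-- def buscamenor(lista):
--     m = max(p[1] for p in lista)
--     best = min(p[0] for p in lista if p[1] == m)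
--     return lista.index((best, m))
-- ===== Notes on version B (the rewrite author's own statement) =====
-- stated objective: simpler
-- what changed: Replaced A's single greedy pass carrying a (best element, best index) state with three declarative passes: max of second keys, min of first keys among maximal-second elements, then list.index of that pair; no mutable best-state tracking.
import Mathlib
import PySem

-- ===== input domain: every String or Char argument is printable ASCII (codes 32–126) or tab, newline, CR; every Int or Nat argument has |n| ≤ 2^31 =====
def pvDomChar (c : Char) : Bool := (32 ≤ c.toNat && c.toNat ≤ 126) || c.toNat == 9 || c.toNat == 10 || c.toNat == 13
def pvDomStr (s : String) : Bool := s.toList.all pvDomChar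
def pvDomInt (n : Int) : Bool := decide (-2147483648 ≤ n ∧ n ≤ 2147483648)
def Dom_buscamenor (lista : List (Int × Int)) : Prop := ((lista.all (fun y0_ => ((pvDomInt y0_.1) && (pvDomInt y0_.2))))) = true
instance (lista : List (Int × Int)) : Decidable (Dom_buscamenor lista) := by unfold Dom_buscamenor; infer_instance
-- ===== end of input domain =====

-- B replaces A's single greedy best-so-far scan with three declarative passes (max key, min tie-break, index); simpler, same cost.

-- ===== PORT A =====
-- loop body of A's for-loop (branches in A's order)
def stepA (lista : List (Int × Int)) (st : (Int × Int) × Int) (i : Int) : (Int × Int) × Int :=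
  let li := (PySem.List.pyGet? lista i).getD (0, 0)
  if li.2 > st.1.2 then (li, i)
  else if li.2 = st.1.2 ∧ li.1 < st.1.1 then (li, i)
  else st

def buscamenor (lista : List (Int × Int)) : Int :=
  let menor := (PySem.List.pyGet? lista 0).getD (0, 0)
  ((PySem.List.pyRange 1 (lista.length : Int) 1).foldl (stepA lista) (menor, 0)).2

-- ===== PORT B =====
-- m = max(p[1] for p in lista)
def mOf (l : List (Int × Int)) : Int :=
  (PySem.List.max? (l.map Prod.snd) (fun y => y)).getD 0

-- best = min(p[0] for p in lista if p[1] == m)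
def bfOf (l : List (Int × Int)) : Int :=
  (PySem.List.min? ((l.filter (fun p => p.2 == mOf l)).map Prod.fst) (fun y => y)).getD 0

def buscamenor_alt (lista : List (Int × Int)) : Int :=
  (((PySem.List.index? lista (bfOf lista, mOf lista)).getD 0 : Nat) : Int)

-- ===== PRECONDITION & SPEC =====
-- Pre_ excludes only the empty list, on which A raises IndexError (lista[0]).
def Pre_buscamenor (lista : List (Int × Int)) : Prop := lista ≠ []
instance (lista : List (Int × Int)) : Decidable (Pre_buscamenor lista) := by unfold Pre_buscamenor; infer_instance
def pvWitness_buscamenor : (List (Int × Int)) := [(1, 2), (3, 4)]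

def Spec_buscamenor (lista : List (Int × Int)) (out : Int) : Prop := out = buscamenor_alt lista
instance (lista : List (Int × Int)) (out : Int) : Decidable (Spec_buscamenor lista out) := by unfold Spec_buscamenor; infer_instance

-- ===== CLAIM (what is proved, stated in full; the proofs are below) =====
def Claim_equal_buscamenor : Prop := ∀ (lista : List (Int × Int)), Dom_buscamenor lista → Pre_buscamenor lista → Spec_buscamenor lista (buscamenor lista)

-- ===== LEMMAS AND PROOFS =====

theorem pyGet?_append_left {α : Type} (l t : List α) (i : Int) (h0 : 0 ≤ i)
    (h : i < (l.length : Int)) : PySem.List.pyGet? (l ++ t) i = PySem.List.pyGet? l i := by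
  have h2 : i.toNat < l.length := by omega
  have hc1 : i < (((l ++ t).length : Nat) : Int) := by simp; omega
  simp only [PySem.List.pyGet?, PySem.List.pyIdx?]
  rw [if_pos h0, if_pos h0, if_pos hc1, if_pos h]
  simp only [Option.bind_some]
  exact List.getElem?_append_left h2

theorem pyGet?_append_length {α : Type} (l : List α) (x : α) :
    PySem.List.pyGet? (l ++ [x]) (l.length : Int) = some x := by
  simp [PySem.List.pyGet?, PySem.List.pyIdx?]

-- mOf is the unique member of the second components that bounds them all
theorem mOf_eq (l : List (Int × Int)) (v : Int) (hv : v ∈ l.map Prod.snd)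
    (hub : ∀ p ∈ l, p.2 ≤ v) : mOf l = v := by
  cases hm : PySem.List.max? (l.map Prod.snd) (fun y => y) with
  | none =>
      rw [PySem.List.max?_eq_none_iff] at hm
      simp [hm] at hv
  | some v' =>
      have h1 : v' ∈ l.map Prod.snd := PySem.List.max?_mem hm
      obtain ⟨p, hp, hpv⟩ := List.mem_map.1 h1
      have h2 : v ≤ v' := PySem.List.max?_isMax hm v hv
      have h3 : v' ≤ v := by rw [← hpv]; exact hub p hp
      simp [mOf, hm]; omega

-- bfOf is the unique w with (w, mOf l) ∈ l that bounds first keys of maximal elements from below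
theorem bfOf_eq (l : List (Int × Int)) (w : Int) (hw : (w, mOf l) ∈ l)
    (hlb : ∀ p ∈ l, p.2 = mOf l → w ≤ p.1) : bfOf l = w := by
  have hwF : w ∈ (l.filter (fun p => p.2 == mOf l)).map Prod.fst := by
    apply List.mem_map.2
    exact ⟨(w, mOf l), List.mem_filter.2 ⟨hw, by simp⟩, rfl⟩
  cases hm : PySem.List.min? ((l.filter (fun p => p.2 == mOf l)).map Prod.fst) (fun y => y) with
  | none =>
      rw [PySem.List.min?_eq_none_iff] at hm
      simp [hm] at hwF
  | some b =>
      have h1 := PySem.List.min?_mem hm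
      obtain ⟨p, hp, hpb⟩ := List.mem_map.1 h1
      have hp' := List.mem_filter.1 hp
      have h2 : w ≤ b := by
        rw [← hpb]; exact hlb p hp'.1 (by simpa using hp'.2)
      have h3 : b ≤ w := PySem.List.min?_isMin hm w hwF
      simp [bfOf, hm]; omega

theorem best_mem (l : List (Int × Int)) (h : l ≠ []) :
    (bfOf l, mOf l) ∈ l ∧ (∀ p ∈ l, p.2 ≤ mOf l) ∧ (∀ p ∈ l, p.2 = mOf l → bfOf l ≤ p.1) := by
  cases hm : PySem.List.max? (l.map Prod.snd) (fun y => y) with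
  | none =>
      rw [PySem.List.max?_eq_none_iff] at hm
      simp [List.map_eq_nil_iff] at hm
      exact absurd hm h
  | some v =>
      have hmv : mOf l = v := by simp [mOf, hm]
      have hub : ∀ p ∈ l, p.2 ≤ mOf l := by
        intro p hp
        rw [hmv]
        exact PySem.List.max?_isMax hm p.2 (List.mem_map.2 ⟨p, hp, rfl⟩)
      have hvmem : v ∈ l.map Prod.snd := PySem.List.max?_mem hm
      obtain ⟨q, hq, hqv⟩ := List.mem_map.1 hvmem
      have hqF : q.1 ∈ (l.filter (fun p => p.2 == mOf l)).map Prod.fst := by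
        apply List.mem_map.2
        exact ⟨q, List.mem_filter.2 ⟨hq, by simp [hmv, hqv]⟩, rfl⟩
      cases hb : PySem.List.min? ((l.filter (fun p => p.2 == mOf l)).map Prod.fst) (fun y => y) with
      | none =>
          rw [PySem.List.min?_eq_none_iff] at hb
          simp [hb] at hqF
      | some b =>
          have hbf : bfOf l = b := by simp [bfOf, hb]
          obtain ⟨p, hp, hpb⟩ := List.mem_map.1 (PySem.List.min?_mem hb)
          have hp' := List.mem_filter.1 hp
          have hpm : p.2 = mOf l := by simpa using hp'.2
          refine ⟨?_, hub, ?_⟩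
          · have : (bfOf l, mOf l) = p := by
              rw [hbf, ← hpb, ← hpm]
            rw [this]; exact hp'.1
          · intro r hr hrm
            rw [hbf]
            exact PySem.List.min?_isMin hb r.1
              (List.mem_map.2 ⟨r, List.mem_filter.2 ⟨hr, by simp [hrm]⟩, rfl⟩)

theorem fold_eq (l : List (Int × Int)) (h : l ≠ []) :
    (PySem.List.pyRange 1 (l.length : Int) 1).foldl (stepA l)
      ((PySem.List.pyGet? l 0).getD (0, 0), 0)
    = ((bfOf l, mOf l), (((PySem.List.index? l (bfOf l, mOf l)).getD 0 : Nat) : Int)) := by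
  induction l using List.reverseRecOn with
  | nil => exact absurd rfl h
  | append_singleton l x ih =>
    by_cases hl : l = []
    · subst hl
      have hm : mOf [x] = x.2 := mOf_eq _ _ (by simp) (by intro p hp; simp at hp; simp [hp])
      have hbf : bfOf [x] = x.1 := by
        apply bfOf_eq
        · rw [hm]; simp
        · intro p hp _; simp at hp; simp [hp]
      have hpair : (bfOf [x], mOf [x]) = x := by rw [hm, hbf]
      simp [PySem.List.pyRange_one_eq_nil (by norm_num : (1:Int) ≤ 1),
            PySem.List.pyGet?, PySem.List.pyIdx?, hpair]
    · obtain ⟨hmem, hub, hlb⟩ := best_mem l hl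
      have hlen : 1 ≤ (l.length : Int) := by
        have := List.length_pos_of_ne_nil hl; omega
      have hcast : (((l ++ [x]).length : Nat) : Int) = (l.length : Int) + 1 := by simp
      rw [hcast, PySem.List.pyRange_one_succ_right hlen, List.foldl_append]
      have hinit : PySem.List.pyGet? (l ++ [x]) 0 = PySem.List.pyGet? l 0 :=
        pyGet?_append_left l [x] 0 le_rfl (by omega)
      rw [hinit]
      have hfold : (PySem.List.pyRange 1 (l.length : Int) 1).foldl (stepA (l ++ [x]))
          ((PySem.List.pyGet? l 0).getD (0, 0), 0)
          = (PySem.List.pyRange 1 (l.length : Int) 1).foldl (stepA l)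
          ((PySem.List.pyGet? l 0).getD (0, 0), 0) := by
        apply PySem.List.foldl_congr_mem
        intro acc i hi
        rw [PySem.List.mem_pyRange_one] at hi
        unfold stepA
        rw [pyGet?_append_left l [x] i (by omega) hi.2]
      rw [hfold, ih hl]
      simp only [List.foldl_cons, List.foldl_nil]
      unfold stepA
      rw [pyGet?_append_length]
      simp only [Option.getD_some]
      by_cases h1 : x.2 > mOf l
      · have hxnot : x ∉ l := fun hx => absurd (hub x hx) (by omega)
        have hm' : mOf (l ++ [x]) = x.2 := by
          apply mOf_eq
          · simp
          · intro p hp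
            rcases List.mem_append.1 hp with hp | hp
            · have := hub p hp; omega
            · simp at hp; simp [hp]
        have hbf' : bfOf (l ++ [x]) = x.1 := by
          apply bfOf_eq
          · rw [hm']; simp
          · intro p hp hpm
            rcases List.mem_append.1 hp with hp | hp
            · have := hub p hp; rw [hm'] at hpm; omega
            · simp at hp; simp [hp]
        have hpair : (bfOf (l ++ [x]), mOf (l ++ [x])) = x := by rw [hm', hbf']
        rw [if_pos h1, hpair, PySem.List.index?_append_singleton_self l x hxnot]
        simp
      · by_cases h2 : x.2 = mOf l ∧ x.1 < bfOf l
        · have hxnot : x ∉ l := fun hx => absurd (hlb x hx h2.1) (by omega)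
          have hm' : mOf (l ++ [x]) = mOf l := by
            apply mOf_eq
            · exact List.mem_map.2 ⟨(bfOf l, mOf l), List.mem_append_left _ hmem, rfl⟩
            · intro p hp
              rcases List.mem_append.1 hp with hp | hp
              · exact hub p hp
              · simp at hp; simp [hp]; omega
          have hbf' : bfOf (l ++ [x]) = x.1 := by
            apply bfOf_eq
            · rw [hm', ← h2.1]; simp
            · intro p hp hpm
              rcases List.mem_append.1 hp with hp | hp
              · rw [hm'] at hpm; have := hlb p hp hpm; omega
              · simp at hp; simp [hp]
          have hpair : (bfOf (l ++ [x]), mOf (l ++ [x])) = x := by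
            rw [hm', hbf', ← h2.1]
          rw [if_neg h1, if_pos h2, hpair, PySem.List.index?_append_singleton_self l x hxnot]
          simp
        · have hm' : mOf (l ++ [x]) = mOf l := by
            apply mOf_eq
            · exact List.mem_map.2 ⟨(bfOf l, mOf l), List.mem_append_left _ hmem, rfl⟩
            · intro p hp
              rcases List.mem_append.1 hp with hp | hp
              · exact hub p hp
              · simp at hp; simp [hp]; omega
          have hbf' : bfOf (l ++ [x]) = bfOf l := by
            apply bfOf_eq
            · rw [hm']; exact List.mem_append_left _ hmem
            · intro p hp hpm
              rcases List.mem_append.1 hp with hp | hp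
              · rw [hm'] at hpm; exact hlb p hp hpm
              · simp at hp; rw [hm'] at hpm
                subst hp
                rcases not_and_or.1 h2 with hc | hc
                · exact absurd hpm hc
                · omega
          rw [if_neg h1, if_neg h2, hm', hbf',
              PySem.List.index?_append_of_mem [x] hmem]

-- ===== VERDICT (by name: the statement is the Claim_ definition above) =====
theorem buscamenor_spec : Claim_equal_buscamenor := by
  intro lista _ hpre
  show buscamenor lista = buscamenor_alt lista
  unfold buscamenor buscamenor_alt
  simp only [fold_eq lista hpre]
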